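-- pv_equiv track=rewrite | github.com/paul5404/Python_coding | main.py | voca
-- ===== SOURCE A (Python) =====
-- def voca(vocas):
--     # "알파벳": 개수
--     cnt = {}
--     vocas = vocas.upper()
--
--     for v in set(vocas):
--         cnt[v] = vocas.count(v)
--
--     flag = max(cnt.values())
--     if list(cnt.values()).count(flag) > 1:
--         return "?"
--     else:
--         for alphabet in cnt:
--             if cnt[alphabet] == flag:
--                 return alphabet.upper()
-- ===== SOURCE B (Python) =====
-- def voca(vocas):
--     # Sort the uppercased characters so equal letters become adjacent, then
--     # scan runs: one (char, run_length) pair per distinct character.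
--     s = sorted(vocas.upper())
--     runs = []
--     while s:
--         c = s[0]
--         k = 0
--         while k < len(s) and s[k] == c:
--             k += 1
--         runs.append((c, k))
--         s = s[k:]
--     m = max(n for _, n in runs)
--     winners = [ch for ch, n in runs if n == m]
--     return "?" if len(winners) > 1 else winners[0]
-- ===== Notes on version B (the rewrite author's own statement) =====
-- stated objective: alternative
-- what changed: B sorts the uppercased characters and run-length-scans the sorted list (one (char, run) pair per distinct char), instead of A's set() pass with a full .count() rescan per distinct character and a dict lookup loop.
import Mathlib
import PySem

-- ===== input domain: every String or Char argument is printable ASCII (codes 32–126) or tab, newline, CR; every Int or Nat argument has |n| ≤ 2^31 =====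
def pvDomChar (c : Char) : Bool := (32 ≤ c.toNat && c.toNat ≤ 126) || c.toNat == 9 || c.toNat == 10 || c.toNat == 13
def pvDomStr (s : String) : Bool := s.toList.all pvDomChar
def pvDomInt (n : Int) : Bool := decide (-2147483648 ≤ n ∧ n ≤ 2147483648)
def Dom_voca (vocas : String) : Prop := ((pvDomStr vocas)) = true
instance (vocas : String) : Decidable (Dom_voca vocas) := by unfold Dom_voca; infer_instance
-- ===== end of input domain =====

-- B sorts the uppercased characters and run-length-scans the sorted list, instead of A's
-- set() pass with a .count() rescan per distinct character (objective: alternative).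

-- ===== PORT A =====
-- cnt = {}; vocas = vocas.upper(); for v in set(vocas): cnt[v] = vocas.count(v)
-- flag = max(cnt.values()); if list(cnt.values()).count(flag) > 1: return "?"
-- else: for alphabet in cnt: if cnt[alphabet] == flag: return alphabet.upper()
def voca (vocas : String) : String :=
  let u : List Char := (PySem.Str.upper vocas).toList
  let cnt : PySem.Dict Char Int :=
    (PySem.Set.ofList u).foldl (fun d v => d.insert v ((PySem.Chars.count u [v] : Int))) PySem.Dict.empty
  match PySem.List.max? cnt.values (fun x => x) with
  | none => ""   -- max([]) raises ValueError on the empty string; excluded by Pre_voca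
  | some flag =>
    if PySem.List.count cnt.values flag > 1 then "?"
    else
      match cnt.keys.find? (fun alphabet => cnt.getD alphabet 0 == flag) with
      | some alphabet => PySem.Str.upper (String.ofList [alphabet])
      | none => ""   -- Python falls off the loop returning None; unreachable (flag is a value of cnt)

-- ===== PORT B =====
-- s = sorted(vocas.upper()); runs = []
-- while s: c = s[0]; k = 0; while k < len(s) and s[k] == c: k += 1; runs.append((c, k)); s = s[k:]
-- (the inner while counts the prefix of s equal to c: k = len(takeWhile (== c) s))
def vocaRuns (s : List Char) : List (Char × Int) :=
  match s with
  | [] => []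
  | c :: t =>
    let k := ((c :: t).takeWhile (fun x => x == c)).length
    (c, (k : Int)) :: vocaRuns ((c :: t).drop k)
termination_by s.length
decreasing_by
  simp only [List.takeWhile_cons, beq_self_eq_true, if_true, List.length_drop, List.length_cons]
  omega

-- m = max(n for _, n in runs); winners = [ch for ch, n in runs if n == m]
-- return "?" if len(winners) > 1 else winners[0]
def voca_alt (vocas : String) : String :=
  let s : List Char := PySem.List.sorted ((PySem.Str.upper vocas).toList) (fun c => c) false
  let runs := vocaRuns s
  match PySem.List.max? (runs.map Prod.snd) (fun x => x) with
  | none => ""   -- max of an empty generator raises ValueError on the empty string; excluded by Pre_voca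
  | some m =>
    let winners := (runs.filter (fun p => p.2 == m)).map Prod.fst
    if winners.length > 1 then "?"
    else
      match winners with
      | w :: _ => String.ofList [w]
      | [] => ""   -- winners[0] IndexError; unreachable (m is a run length)

-- ===== PRECONDITION & SPEC =====
-- Pre_voca excludes only the empty string, on which both A and B raise ValueError (max of an empty sequence).
def Pre_voca (vocas : String) : Prop := vocas ≠ ""
instance (vocas : String) : Decidable (Pre_voca vocas) := by unfold Pre_voca; infer_instance
def pvWitness_voca : String := "hello"
def Spec_voca (vocas : String) (out : String) : Prop := out = voca_alt vocas
instance (vocas : String) (out : String) : Decidable (Spec_voca vocas out) := by unfold Spec_voca; infer_instance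

-- ===== CLAIM (what is proved, stated in full; the proofs are below) =====
def Claim_equal_voca : Prop := ∀ (vocas : String), Dom_voca vocas → Pre_voca vocas → Spec_voca vocas (voca vocas)

-- ===== LEMMAS AND PROOFS =====

-- str.count with a single-character needle is List.count (specific to how A counts occurrences).
theorem countGo_singleton (c : Char) : ∀ (l : List Char) (fuel acc : ℕ), l.length ≤ fuel →
    PySem.Chars.count.go [c] fuel l acc = acc + l.count c := by
  intro l
  induction l with
  | nil => intro fuel acc _; cases fuel <;> simp [PySem.Chars.count.go]
  | cons h t ih =>
    intro fuel acc hfuel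
    cases fuel with
    | zero => simp at hfuel
    | succ f =>
      rw [PySem.Chars.count.go]
      simp only [List.length_cons] at hfuel
      by_cases hc : c = h
      · subst hc
        rw [if_pos (by simp [List.isPrefixOf])]
        simp only [List.length_singleton, List.drop_one, List.tail_cons]
        rw [ih f (acc + 1) (by omega)]
        simp only [List.count_cons, beq_self_eq_true, if_true]
        omega
      · have hch : (h == c) = false := by
          simp only [beq_eq_false_iff_ne, ne_eq]
          exact fun hh => hc hh.symm
        rw [if_neg (by simp [List.isPrefixOf]; exact fun hh => hc hh)]
        rw [ih f acc (by omega)]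
        simp [List.count_cons, hch]

theorem count_singleton (cs : List Char) (c : Char) :
    PySem.Chars.count cs [c] = cs.count c := by
  simp only [PySem.Chars.count, List.isEmpty_cons, if_false, Bool.false_eq_true]
  exact (countGo_singleton c cs cs.length 0 le_rfl).trans (by omega)

-- upperChar is idempotent (the uppercased character is never lowercase).
theorem upperChar_idem (c : Char) :
    PySem.Chars.upperChar (PySem.Chars.upperChar c) = PySem.Chars.upperChar c := by
  by_cases h : PySem.Chars.islower c = true
  · have h1 : 97 ≤ c.toNat ∧ c.toNat ≤ 122 := by
      simp only [PySem.Chars.islower, Bool.and_eq_true, decide_eq_true_eq, Char.le_def] at h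
      exact ⟨h.1, h.2⟩
    have hvalid : (c.toNat - 32).isValidChar := Or.inl (by omega)
    have h2 : (Char.ofNat (c.toNat - 32)).toNat = c.toNat - 32 := by
      unfold Char.ofNat; rw [dif_pos hvalid]; exact Char.toNat_ofNatAux hvalid
    have h3 : PySem.Chars.islower (Char.ofNat (c.toNat - 32)) = false := by
      simp only [PySem.Chars.islower, Bool.and_eq_false_iff, decide_eq_false_iff_not, not_le]
      left
      rw [Char.lt_def]
      show ((Char.ofNat (c.toNat - 32)).toNat : Nat) < ('a' : Char).toNat
      rw [h2]
      show c.toNat - 32 < 97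
      omega
    simp [PySem.Chars.upperChar, h, h3]
  · simp [PySem.Chars.upperChar, h]

-- A's dict (set + per-character rescans) is Counter(u).
theorem dictA_eq_counter (u : List Char) :
    (PySem.Set.ofList u).foldl (fun d v => d.insert v ((PySem.Chars.count u [v] : Int))) PySem.Dict.empty
      = PySem.Dict.counter u := by
  apply PySem.Dict.ext
  rw [PySem.Dict.items_counter]
  rw [PySem.Dict.items_foldl_insert_fresh (PySem.Set.ofList u) (fun a => a)
        (fun a => ((PySem.Chars.count u [a] : Int))) PySem.Dict.empty
        (fun a _ => PySem.Dict.contains_empty a) (by simp)]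
  simp [count_singleton]
  rfl

-- in a sorted list whose elements are all ≥ c, nothing after the leading block of c's equals c
theorem ne_of_mem_dropWhile (c : Char) : ∀ (l : List Char), l.Pairwise (· ≤ ·) →
    (∀ y ∈ l, c ≤ y) → ∀ x ∈ l.dropWhile (fun y => y == c), x ≠ c := by
  intro l
  induction l with
  | nil => simp
  | cons a l ih =>
    intro hp hge x hx
    rw [List.dropWhile_cons] at hx
    by_cases ha : ((a == c) : Bool) = true
    · rw [if_pos ha] at hx
      exact ih (List.Pairwise.of_cons hp) (fun y hy => hge y (List.mem_cons_of_mem _ hy)) x hx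
    · rw [if_neg ha] at hx
      have hane : a ≠ c := by simpa using ha
      have hca : c < a := lt_of_le_of_ne (hge a List.mem_cons_self) (fun h => hane h.symm)
      rcases List.mem_cons.mp hx with rfl | h
      · exact fun h => absurd h.symm (ne_of_lt hca)
      · have hax := (List.pairwise_cons.mp hp).1 x h
        exact fun hxc => absurd (hxc ▸ hax) (not_le.mpr hca)

-- run-length scan of a sorted list: chars are distinct, each char of s appears, lengths are counts
theorem runs_props : ∀ (s : List Char), s.Pairwise (· ≤ ·) →
    ((vocaRuns s).map Prod.fst).Nodup
    ∧ (∀ c, c ∈ (vocaRuns s).map Prod.fst ↔ c ∈ s)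
    ∧ (∀ p ∈ vocaRuns s, p.2 = (s.count p.1 : Int)) := by
  intro s
  induction s using vocaRuns.induct with
  | case1 => intro _; simp [vocaRuns]
  | case2 c t k ih =>
    intro hs
    have hsplit : ((c :: t).takeWhile (fun x => x == c)) ++ ((c :: t).dropWhile (fun x => x == c)) = c :: t :=
      List.takeWhile_append_dropWhile
    have hdropk : (c :: t).drop k = (c :: t).dropWhile (fun x => x == c) := by
      conv_lhs => rw [← hsplit]
      rw [show k = ((c :: t).takeWhile (fun x => x == c)).length from rfl]
      exact List.drop_left
    set tw := (c :: t).takeWhile (fun x => x == c) with htw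
    set w := (c :: t).dropWhile (fun x => x == c) with hwdef
    have htwmem : ∀ x ∈ tw, x = c := by
      intro x hx
      have := List.mem_takeWhile_imp hx
      simpa using this
    have hwsub : w.Sublist (c :: t) := (List.dropWhile_suffix _).sublist
    have hcge : ∀ y ∈ c :: t, c ≤ y := by
      intro y hy
      rcases List.mem_cons.mp hy with rfl | h
      · exact le_refl y
      · exact (List.pairwise_cons.mp hs).1 y h
    have hcnotw : ∀ x ∈ w, x ≠ c := fun x hx => ne_of_mem_dropWhile c (c :: t) hs hcge x hx
    have hmem_iff : ∀ x, x ∈ c :: t ↔ x = c ∨ x ∈ w := by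
      intro x
      constructor
      · intro hx
        rw [← hsplit] at hx
        rcases List.mem_append.mp hx with h | h
        · exact Or.inl (htwmem x h)
        · exact Or.inr h
      · rintro (rfl | h)
        · exact List.mem_cons_self
        · exact hwsub.mem h
    have hcount_split : ∀ x, (c :: t).count x = tw.count x + w.count x := by
      intro x; conv_lhs => rw [← hsplit]
      exact List.count_append
    have htwcount : tw.count c = k := by
      rw [List.count_eq_length.mpr (fun x hx => by simp [htwmem x hx])]
    have htwcount' : ∀ x, x ≠ c → tw.count x = 0 := by
      intro x hx
      exact List.count_eq_zero.mpr (fun hmem => hx (htwmem x hmem))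
    have hwcount : w.count c = 0 := List.count_eq_zero.mpr (fun h => hcnotw c h rfl)
    have hw_pair : w.Pairwise (· ≤ ·) := hs.sublist hwsub
    rw [hdropk] at ih
    obtain ⟨ihnd, ihmem, ihcnt⟩ := ih hw_pair
    have hruns : vocaRuns (c :: t) = (c, (k : Int)) :: vocaRuns w := by
      rw [vocaRuns, hdropk]
    refine ⟨?_, ?_, ?_⟩
    · rw [hruns]
      simp only [List.map_cons, List.nodup_cons]
      refine ⟨fun h => ?_, ihnd⟩
      exact hcnotw c ((ihmem c).mp h) rfl
    · intro x
      rw [hruns, List.map_cons, hmem_iff x]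
      simp only [List.mem_cons, ihmem x]
    · intro p hp
      rw [hruns] at hp
      rcases List.mem_cons.mp hp with h | h
      · subst h
        show (k : Int) = ((c :: t).count c : Int)
        rw [hcount_split c, htwcount, hwcount]
        simp
      · have h2 := ihcnt p h
        have hp1w : p.1 ∈ w := (ihmem p.1).mp (List.mem_map_of_mem h)
        rw [h2, hcount_split p.1, htwcount' p.1 (hcnotw p.1 hp1w)]
        simp

-- max over permuted values (identity key) is equal
theorem max?_id_perm {l l' : List Int} (h : l.Perm l') :
    PySem.List.max? l (fun x => x) = PySem.List.max? l' (fun x => x) := by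
  cases hl : PySem.List.max? l (fun x => x) with
  | none =>
    rw [PySem.List.max?_eq_none_iff] at hl
    subst hl
    have : l' = [] := h.symm.eq_nil
    subst this
    exact (Iff.mpr (PySem.List.max?_eq_none_iff _ _) rfl).symm
  | some m =>
    cases hl' : PySem.List.max? l' (fun x => x) with
    | none =>
      rw [PySem.List.max?_eq_none_iff] at hl'
      subst hl'
      have : l = [] := h.eq_nil
      subst this
      have h0 : PySem.List.max? ([] : List Int) (fun x => x) = none :=
        Iff.mpr (PySem.List.max?_eq_none_iff _ _) rfl
      rw [h0] at hl
      simp at hl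
    | some m' =>
      have hm := PySem.List.max?_mem hl
      have hm' := PySem.List.max?_mem hl'
      have h1 : m ≤ m' := PySem.List.max?_isMax hl' m (h.mem_iff.mp hm)
      have h2 : m' ≤ m := PySem.List.max?_isMax hl m' (h.symm.mem_iff.mp hm')
      rw [le_antisymm h1 h2]

-- first key whose value is the (unique) flag = head of the filtered keys
theorem find?_eq_head?_filter {α : Type} (p : α → Bool) (l : List α) :
    l.find? p = (l.filter p).head? := List.head?_filter.symm

theorem voca_eq (vocas : String) : voca vocas = voca_alt vocas := by
  simp only [voca, voca_alt]
  rw [dictA_eq_counter]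
  set u : List Char := (PySem.Str.upper vocas).toList with hu
  set s : List Char := PySem.List.sorted u (fun c => c) false with hsdef
  have hperm : s.Perm u := PySem.List.sorted_perm u (fun c => c) false
  have hpair : s.Pairwise (· ≤ ·) := PySem.List.sorted_pairwise u (fun c => c)
  set d : PySem.Dict Char Int := PySem.Dict.counter u with hd
  have hKnodup : d.keys.Nodup := PySem.Dict.nodup_keys_counter u
  have hKmem : ∀ x, x ∈ d.keys ↔ x ∈ u := by
    intro x
    rw [hd, PySem.Dict.keys_counter]
    exact PySem.Set.mem_ofList _ _
  have hgetD : ∀ x, d.getD x 0 = (u.count x : Int) := fun x => PySem.Dict.getD_counter u x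
  have hvals : d.values = d.keys.map (fun x => (u.count x : Int)) := by
    rw [PySem.Dict.values_eq_map_keys d hKnodup 0]
    exact List.map_congr_left (fun x _ => hgetD x)
  obtain ⟨hnd, hmemiff, hcnt⟩ := runs_props s hpair
  set runs := vocaRuns s with hrunsdef
  have hcnt' : ∀ p ∈ runs, p.2 = (u.count p.1 : Int) := by
    intro p hp
    rw [hcnt p hp, hperm.count_eq]
  have hFperm : d.keys.Perm (runs.map Prod.fst) := by
    rw [List.perm_ext_iff_of_nodup hKnodup hnd]
    intro x
    rw [hKmem x, hmemiff x, hperm.mem_iff]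
  have hsnd : runs.map Prod.snd = (runs.map Prod.fst).map (fun x => (u.count x : Int)) := by
    rw [List.map_map]
    exact List.map_congr_left (fun p hp => hcnt' p hp)
  have hvperm : d.values.Perm (runs.map Prod.snd) := by
    rw [hvals, hsnd]
    exact hFperm.map _
  rw [max?_id_perm hvperm]
  cases hmax : PySem.List.max? (runs.map Prod.snd) (fun x => x) with
  | none => rfl
  | some flag =>
    dsimp only
    -- the two tie tests count the same number
    have hfilter_runs : runs.filter (fun p => p.2 == flag)
        = runs.filter (fun p => (u.count p.1 : Int) == flag) :=
      List.filter_congr (fun p hp => by rw [hcnt' p hp])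
    have hwinners : (runs.filter (fun p => p.2 == flag)).map Prod.fst
        = (runs.map Prod.fst).filter (fun x => ((u.count x : Int)) == flag) := by
      rw [hfilter_runs, List.filter_map]
      rfl
    have hcntA : PySem.List.count d.values flag
        = (d.keys.filter (fun x => ((u.count x : Int)) == flag)).length := by
      rw [PySem.List.count_eq, hvals, List.count_eq_countP, List.countP_map,
        List.countP_eq_length_filter]
      rfl
    have hlen_eq : (d.keys.filter (fun x => ((u.count x : Int)) == flag)).length
        = ((runs.filter (fun p => p.2 == flag)).map Prod.fst).length := by
      rw [hwinners]
      exact (hFperm.filter _).length_eq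
    rw [hcntA, hlen_eq]
    by_cases hgt : ((runs.filter (fun p => p.2 == flag)).map Prod.fst).length > 1
    · rw [if_pos hgt, if_pos hgt]
    · rw [if_neg hgt, if_neg hgt]
      -- flag is attained, so the filtered lists are nonempty, hence singletons
      have hmemflag : flag ∈ runs.map Prod.snd := PySem.List.max?_mem hmax
      have hBne : (runs.filter (fun p => p.2 == flag)).map Prod.fst ≠ [] := by
        obtain ⟨p, hp, hpeq⟩ := List.mem_map.mp hmemflag
        simp only [ne_eq, List.map_eq_nil_iff, List.filter_eq_nil_iff, not_forall]
        exact ⟨p, hp, by simp [hpeq]⟩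
      have hq : (fun alphabet => d.getD alphabet 0 == flag)
          = (fun x => ((u.count x : Int)) == flag) := funext (fun x => by rw [hgetD x])
      rw [hq, find?_eq_head?_filter]
      -- both lists have length 1; being permutations of each other they are equal singletons
      have hpermF : (d.keys.filter (fun x => ((u.count x : Int)) == flag)).Perm
          ((runs.filter (fun p => p.2 == flag)).map Prod.fst) := by
        rw [hwinners]; exact hFperm.filter _
      cases hB : (runs.filter (fun p => p.2 == flag)).map Prod.fst with
      | nil => exact absurd hB hBne
      | cons w ws =>
        have hlen1 : ((runs.filter (fun p => p.2 == flag)).map Prod.fst).length = 1 := by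
          rw [hB] at hgt ⊢
          simp only [List.length_cons] at hgt ⊢
          omega
        have hws : ws = [] := by
          rw [hB] at hlen1; simp at hlen1; exact hlen1
        subst hws
        have hA1 : d.keys.filter (fun x => ((u.count x : Int)) == flag) = [w] := by
          have hl : (d.keys.filter (fun x => ((u.count x : Int)) == flag)).length = 1 := by
            rw [hpermF.length_eq, hB]; rfl
          cases hAf : d.keys.filter (fun x => ((u.count x : Int)) == flag) with
          | nil => rw [hAf] at hl; simp at hl
          | cons a as =>
            have has : as = [] := by
              rw [hAf] at hl; simp at hl; exact hl
            subst has
            have ha : a ∈ [w] := by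
              have h1 : a ∈ d.keys.filter (fun x => ((u.count x : Int)) == flag) := by
                rw [hAf]; exact List.mem_cons_self
              have h2 := hpermF.mem_iff.mp h1
              rw [hB] at h2
              exact h2
            simp at ha
            rw [ha]
        rw [hA1]
        simp only [List.head?_cons]
        -- w is a key character of u = upper(vocas): upperChar w = w
        have hwmem : w ∈ u := by
          have hwF : w ∈ (runs.filter (fun p => p.2 == flag)).map Prod.fst := by
            rw [hB]; exact List.mem_cons_self
          obtain ⟨p, hp, hpe⟩ := List.mem_map.mp hwF
          have hwr : w ∈ runs.map Prod.fst :=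
            List.mem_map.mpr ⟨p, List.mem_of_mem_filter hp, hpe⟩
          rw [hmemiff w] at hwr
          exact hperm.mem_iff.mp hwr
        have hwu : PySem.Chars.upperChar w = w := by
          rw [hu] at hwmem
          simp only [PySem.Str.toList_upper] at hwmem
          obtain ⟨x, _, hx⟩ := List.mem_map.mp (by simpa [PySem.Chars.upper] using hwmem)
          rw [← hx]; exact upperChar_idem x
        have : PySem.Str.upper (String.ofList [w]) = String.ofList [PySem.Chars.upperChar w] := by
          simp [PySem.Str.upper, PySem.Chars.upper]
        rw [this, hwu]

-- ===== VERDICT (by name: the statement is the Claim_ definition above) =====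
theorem voca_spec : Claim_equal_voca := by
  intro vocas _ _
  unfold Spec_voca
  exact voca_eq vocas
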